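-- pv_equiv track=rewrite | github.com/ElisaTronetti/model-checker | operators.py | U_handler
-- ===== SOURCE A (Python) =====
-- def U_handler(leftFormula,rightFormula,loopIndex):
--     truthTable = []
--     toCompile = 0
--     currentIndex = 0
--     for left, right in zip(leftFormula, rightFormula):
--         if right or ((left is False) and (right is False)):
--             truthTable.insert(currentIndex, right)
--             while toCompile > 0:
--                 truthTable[currentIndex - toCompile] = truthTable[currentIndex]
--                 toCompile -= 1
--         else:
--             truthTable.insert(currentIndex, False)
--             toCompile += 1
--         currentIndex += 1
--     while toCompile > 0:
--         truthTable[currentIndex - toCompile] = truthTable[loopIndex]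
--         toCompile -= 1
--     return truthTable
-- ===== SOURCE B (Python) =====
-- def U_handler(leftFormula, rightFormula, loopIndex):
--     pairs = list(zip(leftFormula, rightFormula))
--     n = len(pairs)
--     rev = []              # result built back-to-front
--     carry = None          # most recent resolved value seen to the right
--     pending = 0           # length of the trailing unresolved run
--     for left, right in reversed(pairs):
--         if right or not left:
--             carry = right
--         if carry is None:
--             pending += 1
--             rev.append(False)
--         else:
--             rev.append(carry)
--     res = rev[::-1]
--     if pending > 0:
--         fill = res[loopIndex]
--         res[n - pending:] = [fill] * pending
--     return res
-- ===== Notes on version B (the rewrite author's own statement) =====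
-- stated objective: alternative
-- what changed: Replaces the forward pass with back-patching of a pending run by a single right-to-left pass that carries the most recent resolved value, then fills the trailing unresolved run in one slice assignment from res[loopIndex].
-- outside the precondition, e.g. on U_handler([True, True], [False, False], 5): A raises IndexError, B raises IndexError
import Mathlib
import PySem

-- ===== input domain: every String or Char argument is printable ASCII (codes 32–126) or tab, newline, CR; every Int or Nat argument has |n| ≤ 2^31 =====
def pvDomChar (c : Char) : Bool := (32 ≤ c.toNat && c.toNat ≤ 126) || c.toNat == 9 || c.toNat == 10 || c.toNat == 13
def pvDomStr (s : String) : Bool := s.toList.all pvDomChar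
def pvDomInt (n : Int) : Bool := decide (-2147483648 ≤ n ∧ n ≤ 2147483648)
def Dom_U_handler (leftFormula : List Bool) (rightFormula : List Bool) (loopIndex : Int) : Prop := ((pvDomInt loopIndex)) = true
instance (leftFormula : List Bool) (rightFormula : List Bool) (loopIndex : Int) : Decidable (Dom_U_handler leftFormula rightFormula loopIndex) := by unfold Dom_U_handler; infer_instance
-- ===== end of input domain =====

-- B replaces A's forward pass with back-patching of a pending run by a right-to-left pass carrying
-- the most recent resolved value plus one slice fill of the trailing run (alternative decomposition).


-- ===== PORT A =====
-- inner 'while toCompile > 0: truthTable[currentIndex - toCompile] = truthTable[currentIndex]; toCompile -= 1'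
-- (in A's run toCompile ≤ currentIndex < len(truthTable) always, so Nat set/getD are exact here)
def pvBackfill (tt : List Bool) (ci : Nat) : Nat → List Bool
  | 0 => tt
  | k + 1 => pvBackfill (tt.set (ci - (k + 1)) (tt.getD ci false)) ci k

-- final 'while toCompile > 0: truthTable[currentIndex - toCompile] = truthTable[loopIndex]; toCompile -= 1'
-- (truthTable[loopIndex] is Python indexing: pyGet?; none = IndexError, excluded by Pre_)
def pvFinal (li : Int) (ci : Nat) : List Bool → Nat → List Bool
  | tt, 0 => tt
  | tt, k + 1 =>
    match PySem.List.pyGet? tt li with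
    | some v => pvFinal li ci (tt.set (ci - (k + 1)) v) k
    | none => tt

-- one iteration of A's for-loop; state = (truthTable, toCompile, currentIndex)
def pvStepA (st : List Bool × Nat × Nat) (p : Bool × Bool) : List Bool × Nat × Nat :=
  if p.2 || ((p.1 == false) && (p.2 == false)) then
    (pvBackfill (PySem.List.insert st.1 (st.2.2 : Int) p.2) st.2.2 st.2.1, 0, st.2.2 + 1)
  else
    (PySem.List.insert st.1 (st.2.2 : Int) false, st.2.1 + 1, st.2.2 + 1)

def U_handler (leftFormula : List Bool) (rightFormula : List Bool) (loopIndex : Int) : List Bool :=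
  let s := (List.zip leftFormula rightFormula).foldl pvStepA ([], 0, 0)
  pvFinal loopIndex s.2.2 s.1 s.2.1

-- ===== PORT B =====
-- one iteration of B's reversed loop; state = (rev, carry, pending)
def pvStepB (st : List Bool × Option Bool × Nat) (p : Bool × Bool) : List Bool × Option Bool × Nat :=
  let carry := if p.2 || !p.1 then some p.2 else st.2.1
  match carry with
  | none => (st.1 ++ [false], none, st.2.2 + 1)
  | some v => (st.1 ++ [v], some v, st.2.2)

def U_handler_alt (leftFormula : List Bool) (rightFormula : List Bool) (loopIndex : Int) : List Bool :=
  let pairs := List.zip leftFormula rightFormula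
  let n := pairs.length
  let s := pairs.reverse.foldl pvStepB ([], none, 0)
  let res := s.1.reverse
  if s.2.2 > 0 then
    match PySem.List.pyGet? res loopIndex with   -- res[loopIndex]; none = IndexError, excluded by Pre_
    | some fill => res.take (n - s.2.2) ++ List.replicate s.2.2 fill
    | none => res
  else res

-- ===== PRECONDITION & SPEC =====
-- Pre_ excludes exactly the inputs where Python A raises IndexError: a trailing unresolved run
-- exists (the last zipped pair is (True, False)) and loopIndex is outside [-n, n); B raises there too.
def Pre_U_handler (leftFormula : List Bool) (rightFormula : List Bool) (loopIndex : Int) : Prop :=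
  (List.zip leftFormula rightFormula).getLast? = some (true, false) →
    PySem.Raise.InRange (List.zip leftFormula rightFormula).length loopIndex

instance (leftFormula : List Bool) (rightFormula : List Bool) (loopIndex : Int) : Decidable (Pre_U_handler leftFormula rightFormula loopIndex) := by unfold Pre_U_handler; infer_instance

def pvWitness_U_handler : List Bool × List Bool × Int := ([true, true], [false, true], 5)

def Spec_U_handler (leftFormula : List Bool) (rightFormula : List Bool) (loopIndex : Int) (out : List Bool) : Prop := out = U_handler_alt leftFormula rightFormula loopIndex
instance (leftFormula : List Bool) (rightFormula : List Bool) (loopIndex : Int) (out : List Bool) : Decidable (Spec_U_handler leftFormula rightFormula loopIndex out) := by unfold Spec_U_handler; infer_instance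

-- ===== CLAIM (what is proved, stated in full; the proofs are below) =====
def Claim_equal_U_handler : Prop := ∀ (leftFormula : List Bool) (rightFormula : List Bool) (loopIndex : Int), Dom_U_handler leftFormula rightFormula loopIndex → Pre_U_handler leftFormula rightFormula loopIndex → Spec_U_handler leftFormula rightFormula loopIndex (U_handler leftFormula rightFormula loopIndex)

-- ===== LEMMAS AND PROOFS =====

-- Reference function: the pair list processed from the right, returning
-- (table with trailing pending entries as false, leftmost resolved right-value, trailing pending count).
def pvR : List (Bool × Bool) → List Bool × Option Bool × Nat
  | [] => ([], none, 0)
  | p :: t =>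
    let s := pvR t
    if p.2 || !p.1 then (p.2 :: s.1, some p.2, s.2.2)
    else match s.2.1 with
      | none => (false :: s.1, none, s.2.2 + 1)
      | some v => (v :: s.1, some v, s.2.2)

theorem pvR_length (z : List (Bool × Bool)) : (pvR z).1.length = z.length := by
  induction z with
  | nil => rfl
  | cons p t ih =>
    simp only [pvR]
    split
    · simpa using ih
    · cases h : (pvR t).2.1 <;> simp [ih]

theorem pvR_count_le (z : List (Bool × Bool)) : (pvR z).2.2 ≤ z.length := by
  induction z with
  | nil => simp [pvR]
  | cons p t ih =>
    simp only [pvR]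
    split
    · simpa using Nat.le_succ_of_le ih
    · cases h : (pvR t).2.1 <;> simp <;> omega

-- A's inner back-patching loop, characterized.
theorem pvBackfill_spec : ∀ (m : Nat) (pre : List Bool) (mid : List Bool) (v : Bool) (post : List Bool),
    mid.length = m →
    pvBackfill (pre ++ mid ++ v :: post) (pre.length + m) m = pre ++ List.replicate m v ++ v :: post := by
  intro m
  induction m with
  | zero => intro pre mid v post hm; simp [List.length_eq_zero_iff.mp hm, pvBackfill]
  | succ k ih =>
    intro pre mid v post hm
    cases mid with
    | nil => simp at hm
    | cons x mid' =>
      simp only [List.length_cons] at hm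
      simp only [pvBackfill]
      have hidx : pre.length + (k + 1) - (k + 1) = pre.length := by omega
      have hget : (pre ++ (x :: mid') ++ v :: post).getD (pre.length + (k + 1)) false = v := by
        rw [List.getD_eq_getElem?_getD]
        rw [show pre ++ (x :: mid') ++ v :: post = (pre ++ x :: mid') ++ v :: post by simp]
        rw [show pre.length + (k + 1) = (pre ++ x :: mid').length by simp [hm]]
        simp
      have hset : (pre ++ (x :: mid') ++ v :: post).set (pre.length + (k + 1) - (k + 1)) v
          = (pre ++ [v]) ++ mid' ++ v :: post := by
        rw [hidx]
        simp [List.set_append]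
      rw [hget, hset]
      have := ih (pre ++ [v]) mid' v post (by omega)
      rw [show (pre ++ [v]).length + k = pre.length + (k + 1) by simp; omega] at this
      rw [this]
      simp [List.replicate_succ]

-- reading tt[loopIndex] is unchanged by writing back the very value that was read
theorem pyGet?_set_eq_some {tt : List Bool} {li : Int} {v : Bool} (i : Nat)
    (h : PySem.List.pyGet? tt li = some v) :
    PySem.List.pyGet? (tt.set i v) li = some v := by
  simp only [PySem.List.pyGet?, List.length_set] at h ⊢
  cases hk : PySem.List.pyIdx? tt.length li with
  | none => rw [hk] at h; simp at h
  | some k =>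
    rw [hk] at h
    simp only [Option.bind_some] at h ⊢
    rw [List.getElem?_set]
    by_cases hik : i = k
    · subst hik
      have : i < tt.length := by
        by_contra hge
        rw [List.getElem?_eq_none (by omega)] at h
        simp at h
      simp [this]
    · simp [hik, h]

-- A's final loop, characterized: every read of truthTable[loopIndex] yields the same value.
theorem pvFinal_spec : ∀ (m : Nat) (tt : List Bool) (li : Int) (n : Nat), n = tt.length → m ≤ n →
    pvFinal li n tt m = (match PySem.List.pyGet? tt li with
      | none => tt
      | some v => tt.take (n - m) ++ List.replicate m v) := by
  intro m
  induction m with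
  | zero =>
    intro tt li n hn hm
    cases h : PySem.List.pyGet? tt li <;> simp [pvFinal, hn]
  | succ k ih =>
    intro tt li n hn hm
    cases h : PySem.List.pyGet? tt li with
    | none => simp [pvFinal, h]
    | some v =>
      simp only [pvFinal, h]
      have hlt : n - (k + 1) < tt.length := by omega
      have hset := pyGet?_set_eq_some (tt := tt) (li := li) (v := v) (n - (k + 1)) h
      rw [ih (tt.set (n - (k + 1)) v) li n (by simp [hn]) (by omega)]
      rw [hset]
      rw [List.set_eq_take_cons_drop v hlt]
      rw [List.take_append]
      have hlen : (tt.take (n - (k+1))).length = n - (k+1) := by simp; omega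
      simp only [hlen]
      have h2 : n - k - (n - (k + 1)) = 1 := by omega
      rw [List.take_take]
      have h3 : min (n - k) (n - (k+1)) = n - (k+1) := by omega
      rw [h3, h2]
      simp [List.replicate_succ]

-- A's main loop, characterized against pvR.
theorem pvFoldA_spec : ∀ (z : List (Bool × Bool)) (tt : List Bool) (tc : Nat),
    tc ≤ tt.length → tt.drop (tt.length - tc) = List.replicate tc false →
    z.foldl pvStepA (tt, tc, tt.length)
    = (tt.take (tt.length - tc)
        ++ List.replicate tc ((pvR z).2.1.getD false)
        ++ (pvR z).1,
       (match (pvR z).2.1 with | none => tc + (pvR z).2.2 | some _ => (pvR z).2.2),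
       tt.length + z.length) := by
  intro z
  induction z with
  | nil =>
    intro tt tc hle hdrop
    simp only [List.foldl_nil, pvR]
    refine Prod.ext ?_ (Prod.ext rfl rfl)
    simp only [Option.getD_none]
    rw [← hdrop, List.take_append_drop]; simp
  | cons p t ih =>
    intro tt tc hle hdrop
    have hcond : (p.2 || ((p.1 == false) && (p.2 == false))) = (p.2 || !p.1) := by
      cases p.1 <;> cases p.2 <;> rfl
    simp only [List.foldl_cons, pvStepA, hcond]
    by_cases hres : (p.2 || !p.1) = true
    · -- resolved branch
      rw [if_pos hres]
      have hins : PySem.List.insert tt (tt.length : Int) p.2 = tt ++ [p.2] :=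
        PySem.List.insert_len tt p.2
      rw [hins]
      have hsplit : tt ++ [p.2]
          = tt.take (tt.length - tc) ++ tt.drop (tt.length - tc) ++ p.2 :: [] := by
        simp [List.take_append_drop]
      have hbf : pvBackfill (tt ++ [p.2]) tt.length tc
          = tt.take (tt.length - tc) ++ List.replicate tc p.2 ++ p.2 :: [] := by
        rw [hsplit, hdrop]
        have hpre : (tt.take (tt.length - tc)).length = tt.length - tc := by simp
        have := pvBackfill_spec tc (tt.take (tt.length - tc)) (List.replicate tc false) p.2 []
          (by simp)
        rw [hpre] at this
        rw [show tt.length - tc + tc = tt.length by omega] at this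
        exact this
      rw [hbf]
      set tt' := tt.take (tt.length - tc) ++ List.replicate tc p.2 ++ [p.2] with htt'
      have hlen' : tt'.length = tt.length + 1 := by simp [htt']; omega
      have := ih tt' 0 (by omega) (by simp)
      rw [hlen'] at this
      rw [show tt.length + 1 = tt'.length by omega] at this ⊢
      rw [this]
      simp only [pvR]
      rw [if_pos hres]
      refine Prod.ext ?_ (Prod.ext ?_ ?_)
      · rw [List.take_of_length_le (by simp <;> omega)]
        simp [htt']
      · cases h : (pvR t).2.1 <;> simp
      · simp; omega
    · -- unresolved branch
      rw [if_neg hres]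
      have hins : PySem.List.insert tt (tt.length : Int) false = tt ++ [false] :=
        PySem.List.insert_len tt false
      rw [hins]
      have hdrop' : (tt ++ [false]).drop ((tt ++ [false]).length - (tc + 1))
          = List.replicate (tc + 1) false := by
        simp only [List.length_append, List.length_cons, List.length_nil]
        rw [show tt.length + (0 + 1) - (tc + 1) = tt.length - tc by omega]
        rw [List.drop_append_of_le_length (by omega)]
        rw [hdrop, ← List.replicate_succ']
      have := ih (tt ++ [false]) (tc + 1) (by simp; omega) hdrop'
      rw [show (tt ++ [false]).length = tt.length + 1 by simp] at this
      rw [this]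
      simp only [pvR]
      rw [if_neg hres]
      cases h : (pvR t).2.1 with
      | none =>
        refine Prod.ext ?_ (Prod.ext ?_ ?_)
        · simp only [h, Option.getD_none]
          rw [show tt.length + 1 - (tc + 1) = tt.length - tc by omega]
          rw [List.take_append_of_le_length (by omega)]
          simp [List.replicate_succ']
        · simp only [h]
          ac_rfl
        · simp; omega
      | some v =>
        refine Prod.ext ?_ (Prod.ext ?_ ?_)
        · simp only [h, Option.getD_some]
          rw [show tt.length + 1 - (tc + 1) = tt.length - tc by omega]
          rw [List.take_append_of_le_length (by omega)]
          simp [List.replicate_succ']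
        · simp [h]
        · simp; omega

-- B's reversed loop, characterized against pvR.
theorem pvFoldB_spec : ∀ (z : List (Bool × Bool)),
    z.reverse.foldl pvStepB ([], none, 0)
    = ((pvR z).1.reverse, (pvR z).2.1, (pvR z).2.2) := by
  intro z
  induction z with
  | nil => simp [pvR]
  | cons p t ih =>
    rw [List.reverse_cons, List.foldl_append, ih]
    simp only [List.foldl_cons, List.foldl_nil, pvStepB, pvR]
    by_cases hres : (p.2 || !p.1) = true
    · simp [hres]
    · simp only [hres]
      cases h : (pvR t).2.1 <;> simp [h]

-- the two ports agree on every input (out-of-range loopIndex included: both then skip the fill)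
theorem U_handler_eq (leftFormula rightFormula : List Bool) (loopIndex : Int) :
    U_handler leftFormula rightFormula loopIndex = U_handler_alt leftFormula rightFormula loopIndex := by
  simp only [U_handler, U_handler_alt]
  rw [pvFoldB_spec (List.zip leftFormula rightFormula)]
  have hA := pvFoldA_spec (List.zip leftFormula rightFormula) [] 0 (by simp) (by simp)
  simp only [List.length_nil, List.take_nil, List.replicate_zero, List.nil_append,
    Nat.zero_add] at hA
  rw [hA]
  simp only [List.reverse_reverse]
  set z := List.zip leftFormula rightFormula with hz
  have hlen := pvR_length z
  have hcle := pvR_count_le z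
  have hk : (match (pvR z).2.1 with
      | none => (pvR z).2.2 | some _ => (pvR z).2.2) = (pvR z).2.2 := by
    cases (pvR z).2.1 <;> simp
  rw [hk]
  rw [pvFinal_spec (pvR z).2.2 (pvR z).1 loopIndex z.length hlen.symm hcle]
  by_cases hkz : (pvR z).2.2 > 0
  · rw [if_pos hkz]
    cases h : PySem.List.pyGet? (pvR z).1 loopIndex <;> simp
  · rw [if_neg hkz]
    have h0 : (pvR z).2.2 = 0 := by omega
    cases h : PySem.List.pyGet? (pvR z).1 loopIndex with
    | none => rfl
    | some v =>
      simp only [h0, Nat.sub_zero, List.replicate_zero, List.append_nil]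
      rw [← hlen, List.take_length]

-- ===== VERDICT (by name: the statement is the Claim_ definition above) =====
theorem U_handler_spec : Claim_equal_U_handler := by
  intro leftFormula rightFormula loopIndex _ _
  unfold Spec_U_handler
  exact U_handler_eq leftFormula rightFormula loopIndex
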